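-- pv_equiv track=rewrite | github.com/SteVwonder/advent_of_code | 2024/day11/__main__.py | expand_stone_once
-- ===== SOURCE A (Python) =====
-- from collections import Counter
--
-- def expand_stone_once(stone) -> Counter:
--     if stone == 0:
--         return Counter([1])
--
--     str_stone = str(stone)
--     if len(str_stone) % 2 == 0:
--         halfway = len(str_stone) // 2
--         return Counter([int(x) for x in [str_stone[0:halfway], str_stone[halfway:]]])
--
--     return Counter([stone * 2024])
-- ===== SOURCE B (Python) =====
-- from collections import Counter
--
-- def expand_stone_once(stone) -> Counter:
--     if stone == 0:
--         return Counter([1])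
--     n = 1
--     t = stone
--     while t >= 10:
--         t //= 10
--         n += 1
--     if n % 2 == 0:
--         power = 10 ** (n // 2)
--         left, right = divmod(stone, power)
--         return Counter([left, right])
--     return Counter([stone * 2024])
-- ===== Notes on version B (the rewrite author's own statement) =====
-- stated objective: alternative
-- what changed: Replaces str(stone) conversion, len/parity on the string, slicing and int() re-parsing by pure integer arithmetic: a digit-count loop (t //= 10), power = 10**(n//2) and divmod(stone, power).
-- outside the precondition, e.g. on expand_stone_once(-123): A returns {-1: 1, 23: 1}, B returns {-248952: 1}; on expand_stone_once(-5): A raises ValueError, B returns {-10120: 1}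
import Mathlib
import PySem

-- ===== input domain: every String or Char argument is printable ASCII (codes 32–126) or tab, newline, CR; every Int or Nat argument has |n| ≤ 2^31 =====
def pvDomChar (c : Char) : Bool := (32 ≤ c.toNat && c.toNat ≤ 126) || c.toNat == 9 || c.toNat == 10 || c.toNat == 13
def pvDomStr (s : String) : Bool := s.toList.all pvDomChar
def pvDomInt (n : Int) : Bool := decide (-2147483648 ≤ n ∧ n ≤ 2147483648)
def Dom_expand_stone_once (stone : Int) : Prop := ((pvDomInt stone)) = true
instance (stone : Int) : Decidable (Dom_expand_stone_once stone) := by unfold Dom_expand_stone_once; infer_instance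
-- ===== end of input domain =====

-- B replaces A's string conversion/slicing by pure integer arithmetic (digit-count loop, 10^(n//2), divmod).

-- ===== PORT A =====
def expand_stone_once (stone : Int) : List (Int × Int) :=
  if stone = 0 then (PySem.Dict.counter [(1 : Int)]).items
  else
    let str_stone := PySem.Int.toStr stone
    if PySem.Int.mod (PySem.Str.len str_stone) 2 = 0 then
      let halfway := PySem.Int.floordiv (PySem.Str.len str_stone) 2
      match PySem.Int.ofStr? (PySem.Str.slice str_stone (some 0) (some halfway)),
            PySem.Int.ofStr? (PySem.Str.slice str_stone (some halfway) none) with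
      | some a, some b => (PySem.Dict.counter [a, b]).items
      | _, _ => []   -- int('-') raises ValueError: only outside Pre_
    else (PySem.Dict.counter [stone * 2024]).items

-- ===== PORT B =====
-- 'n = 1; t = stone; while t >= 10: t //= 10; n += 1'
def pvDigitCount (t : Int) (n : Nat) : Nat :=
  if h : 10 ≤ t then pvDigitCount (PySem.Int.floordiv t 10) (n + 1) else n
termination_by t.toNat
decreasing_by
  have h0 : t = ((t.toNat : Nat) : Int) := by omega
  have h1 : PySem.Int.floordiv t 10 = ((t.toNat / 10 : Nat) : Int) := by
    rw [h0]; exact_mod_cast PySem.Int.floordiv_natCast t.toNat 10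
  rw [h1]
  have : t.toNat / 10 < t.toNat := Nat.div_lt_self (by omega) (by omega)
  omega

def expand_stone_once_alt (stone : Int) : List (Int × Int) :=
  if stone = 0 then (PySem.Dict.counter [(1 : Int)]).items
  else
    let n := pvDigitCount stone 1
    if n % 2 = 0 then
      let power : Int := 10 ^ (n / 2)
      let left := PySem.Int.floordiv stone power
      let right := PySem.Int.mod stone power
      (PySem.Dict.counter [left, right]).items
    else (PySem.Dict.counter [stone * 2024]).items

-- ===== PRECONDITION & SPEC =====
-- Pre_ excludes negative stones whose absolute value has an odd number of decimal digits:
-- there str(stone) has even length only because of the '-' sign, and A's string split treats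
-- the sign as a digit (int('-') raises ValueError for -1..-9; longer such stones are split
-- into a '-'-prefixed left part) — an accidental artefact of the string representation.
def Pre_expand_stone_once (stone : Int) : Prop :=
  0 ≤ stone ∨ Nat.log 10 stone.natAbs % 2 = 1
instance (stone : Int) : Decidable (Pre_expand_stone_once stone) := by
  unfold Pre_expand_stone_once; infer_instance

def pvWitness_expand_stone_once : Int := 1234

def Spec_expand_stone_once (stone : Int) (out : List (Int × Int)) : Prop := out = expand_stone_once_alt stone
instance (stone : Int) (out : List (Int × Int)) : Decidable (Spec_expand_stone_once stone out) := by unfold Spec_expand_stone_once; infer_instance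

-- ===== CLAIM (what is proved, stated in full; the proofs are below) =====
def Claim_equal_expand_stone_once : Prop := ∀ (stone : Int), Dom_expand_stone_once stone → Pre_expand_stone_once stone → Spec_expand_stone_once stone (expand_stone_once stone)

-- ===== LEMMAS AND PROOFS =====

-- the digit-accumulating fold that int() performs on a digit string
def pvVal (a : Nat) (t : List Char) : Nat :=
  t.foldl (fun a d => a * 10 + (d.toNat - '0'.toNat)) a

-- generic characterization of the digit-parsing loop inside PySem.Int.ofChars?;
-- g is pinned to the (private) loop by unification at the use site
theorem pv_dv_spec (g : List Char → Bool → Nat → Option Nat) (v : List Char → Option Nat)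
    (hpin : ∀ r : List Char, v ('7' :: r) = g r true (0 * 10 + ('7'.toNat - '0'.toNat)))
    (hv : ∀ (c : Char) (r : List Char), v (c :: r) = g (c :: r) false 0)
    (h0 : ∀ a : Nat, g [] true a = some a)
    (h1 : ∀ (c : Char) (r : List Char) (b : Bool) (a : Nat), c.isDigit = true →
        g (c :: r) b a = g r true (a * 10 + (c.toNat - '0'.toNat)))
    (c : Char) (t : List Char) (hc : c.isDigit = true) (ht : ∀ x ∈ t, x.isDigit = true) :
    (Option.map (fun n : Int => n) (do
        let a ← v (c :: t)
        pure ((a : Nat) : Int))) =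
      some ((pvVal 0 (c :: t) : Nat) : Int) := by
  have main : ∀ (u : List Char) (a : Nat), (∀ x ∈ u, x.isDigit = true) →
      g u true a = some (pvVal a u) := by
    intro u
    induction u with
    | nil => intro a _; simpa [pvVal] using h0 a
    | cons d r ih =>
      intro a hall
      rw [h1 d r true a (hall d (by simp)), pvVal, List.foldl_cons]
      exact ih _ (fun x hx => hall x (by simp [hx]))
  rw [hv, h1 c t false 0 hc, main t _ ht]
  simp [pvVal]

theorem pv_not_space (c : Char) (h : c.isDigit = true) : PySem.Int.isIntSpace c = false := by
  simp only [PySem.Int.isIntSpace, Bool.or_eq_false_iff, decide_eq_false_iff_not]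
  simp [Char.isDigit] at h
  refine ⟨⟨⟨⟨⟨?_, ?_⟩, ?_⟩, ?_⟩, ?_⟩, ?_⟩ <;> (intro hc; subst hc; simp_all)

theorem pv_dropWhile_eq_self (l : List Char) (h : ∀ x ∈ l, PySem.Int.isIntSpace x = false) :
    l.dropWhile PySem.Int.isIntSpace = l := by
  cases l with
  | nil => rfl
  | cons c t => rw [List.dropWhile_cons_of_neg]; simp [h c (by simp)]

theorem pv_strip_id (l : List Char) (h : ∀ x ∈ l, PySem.Int.isIntSpace x = false) :
    (List.dropWhile PySem.Int.isIntSpace (List.dropWhile PySem.Int.isIntSpace l).reverse).reverse = l := by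
  rw [pv_dropWhile_eq_self l h, pv_dropWhile_eq_self _ (fun x hx => h x (List.mem_reverse.mp hx)),
      List.reverse_reverse]

-- int() of a non-empty all-digit character list
theorem pv_parse (c : Char) (t : List Char)
    (hc : c.isDigit = true) (ht : ∀ x ∈ t, x.isDigit = true) :
    PySem.Int.ofChars? (c :: t) = some ((pvVal 0 (c :: t) : Nat) : Int) := by
  have hall : ∀ x ∈ (c :: t), PySem.Int.isIntSpace x = false := by
    intro x hx
    rcases List.mem_cons.mp hx with rfl | hx
    · exact pv_not_space x hc
    · exact pv_not_space x (ht x hx)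
  unfold PySem.Int.ofChars?
  rw [pv_strip_id _ hall]
  simp only []
  split
  · rename_i h
    have hcm : c = '-' := (List.cons.injEq _ _ _ _ ▸ h).1
    rw [hcm] at hc; simp at hc
  · rename_i h
    have hcm : c = '+' := (List.cons.injEq _ _ _ _ ▸ h).1
    rw [hcm] at hc; simp at hc
  · exact pv_dv_spec _ _ (fun r => rfl) (fun c r => rfl) (fun a => rfl)
      (by intro c r b a hcd
          conv_lhs => whnf
          rw [hcd]
          rfl) c t hc ht

theorem pv_foldl_acc : ∀ (t : List Char) (a : Nat), pvVal a t = a * 10 ^ t.length + pvVal 0 t := by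
  intro t
  induction t with
  | nil => intro a; simp [pvVal]
  | cons c r ih =>
    intro a
    simp only [pvVal, List.foldl_cons] at *
    rw [ih (a * 10 + (c.toNat - '0'.toNat)), ih (0 * 10 + (c.toNat - '0'.toNat))]
    simp [List.length_cons, pow_succ]
    ring

theorem pv_digit_le (c : Char) (h : c.isDigit = true) : c.toNat - '0'.toNat ≤ 9 := by
  simp [Char.isDigit] at h
  obtain ⟨h1, h2⟩ := h
  rw [UInt32.le_iff_toNat_le] at h1 h2
  have e : c.toNat = c.val.toNat := rfl
  have e2 : (48 : UInt32).toNat = 48 := rfl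
  have e3 : (57 : UInt32).toNat = 57 := rfl
  have h0 : '0'.toNat = 48 := rfl
  omega

theorem pv_val_lt : ∀ (t : List Char), (∀ x ∈ t, x.isDigit = true) → pvVal 0 t < 10 ^ t.length := by
  intro t
  induction t with
  | nil => intro _; simp [pvVal]
  | cons c r ih =>
    intro hall
    have h1 : pvVal 0 (c :: r) = (0 * 10 + (c.toNat - '0'.toNat)) * 10 ^ r.length + pvVal 0 r := by
      rw [pvVal, List.foldl_cons, ← pvVal, pv_foldl_acc]
    rw [h1]
    have h2 : pvVal 0 r < 10 ^ r.length := ih (fun x hx => hall x (by simp [hx]))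
    have h3 : c.toNat - '0'.toNat ≤ 9 := pv_digit_le c (hall c (by simp))
    have h4 : (0 * 10 + (c.toNat - '0'.toNat)) * 10 ^ r.length ≤ 9 * 10 ^ r.length := by
      exact Nat.mul_le_mul_right _ (by omega)
    simp only [List.length_cons, pow_succ]
    omega

theorem pv_digitChar_val (d : Nat) (h : d < 10) :
    (Nat.digitChar d).toNat - '0'.toNat = d := by
  interval_cases d <;> decide

theorem pv_val_toDigits : ∀ (m : Nat), pvVal 0 (Nat.toDigits 10 m) = m := by
  intro m
  induction m using Nat.strong_induction_on with
  | _ m ih =>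
    by_cases h : m < 10
    · rw [Nat.toDigits_of_lt_base h]
      simp only [pvVal, List.foldl_cons, List.foldl_nil, Nat.zero_mul, Nat.zero_add]
      exact pv_digitChar_val m h
    · rw [Nat.toDigits_eq_if (by omega), if_neg h]
      have hsplit : pvVal 0 (Nat.toDigits 10 (m / 10) ++ [(m % 10).digitChar]) =
          pvVal (pvVal 0 (Nat.toDigits 10 (m / 10))) [(m % 10).digitChar] := by
        simp [pvVal, List.foldl_append]
      rw [hsplit, ih (m / 10) (Nat.div_lt_self (by omega) (by omega))]
      have hdv : (Nat.digitChar (m % 10)).toNat - '0'.toNat = m % 10 :=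
        pv_digitChar_val _ (Nat.mod_lt _ (by omega))
      simp only [pvVal, List.foldl_cons, List.foldl_nil, hdv]
      omega

theorem pv_toDigits_digits (m : Nat) : ∀ c ∈ Nat.toDigits 10 m, c.isDigit = true :=
  fun _ hc => Nat.isDigit_of_mem_toDigits (by omega) (by omega) hc

theorem pv_len_toDigits (m : Nat) (h : 0 < m) :
    (Nat.toDigits 10 m).length = Nat.log 10 m + 1 := by
  refine le_antisymm ?_ ?_
  · exact (Nat.length_toDigits_le_iff (by omega) (by omega)).mpr
      (Nat.lt_pow_succ_log_self (by omega) m)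
  · by_contra hlt
    push_neg at hlt
    have hle : (Nat.toDigits 10 m).length ≤ Nat.log 10 m := by omega
    rcases Nat.eq_zero_or_pos (Nat.log 10 m) with h0 | h0
    · have := Nat.length_toDigits_pos (b := 10) (n := m); omega
    · have := (Nat.length_toDigits_le_iff (b := 10) (n := m) (by omega) h0).mp hle
      have := Nat.pow_log_le_self 10 (x := m) (by omega)
      omega

theorem pv_digitCount_eq : ∀ (m : Nat), 0 < m → ∀ (n : Nat),
    pvDigitCount (m : Int) n = n + Nat.log 10 m := by
  intro m
  induction m using Nat.strong_induction_on with
  | _ m ih =>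
    intro hm n
    by_cases h : m < 10
    · unfold pvDigitCount
      rw [dif_neg (by exact_mod_cast (by omega : ¬ (10 ≤ (m : Int)))), Nat.log_eq_zero_iff.mpr (by omega)]
      omega
    · unfold pvDigitCount
      rw [dif_pos (by exact_mod_cast (by omega : (10 : Int) ≤ (m : Int)))]
      rw [show PySem.Int.floordiv ((m : Nat) : Int) 10 = (((m / 10 : Nat)) : Int) by exact_mod_cast PySem.Int.floordiv_natCast m 10]
      rw [ih (m / 10) (Nat.div_lt_self (by omega) (by omega)) (Nat.div_pos (by omega) (by omega)) (n + 1)]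
      have hlog : Nat.log 10 (m / 10) = Nat.log 10 m - 1 := Nat.log_div_base 10 m
      have h1 : 1 ≤ Nat.log 10 m := by
        rw [Nat.one_le_iff_ne_zero, Ne, Nat.log_eq_zero_iff]
        omega
      omega

-- division characterization used to match A's string halves with B's divmod
theorem pv_div_mod_char (q r p m : Nat) (hp : 0 < p) (hm : m = q * p + r) (hr : r < p) :
    m / p = q ∧ m % p = r := by
  subst hm
  constructor
  · rw [mul_comm q p, Nat.mul_add_div hp, Nat.div_eq_of_lt hr, Nat.add_zero]
  · rw [mul_comm q p, Nat.mul_add_mod, Nat.mod_eq_of_lt hr]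

theorem pv_mod_two (k : Nat) : PySem.Int.mod ((k : Nat) : Int) 2 = ((k % 2 : Nat) : Int) := by
  exact_mod_cast PySem.Int.mod_natCast k 2

theorem pv_main (stone : Int) (hpre : Pre_expand_stone_once stone) (h0 : ¬ stone = 0) :
    expand_stone_once stone = expand_stone_once_alt stone := by
  rcases lt_or_ge stone 0 with hneg | hpos
  -- negative stones inside Pre_: both sides take the odd branch
  · have hlog : Nat.log 10 stone.natAbs % 2 = 1 := by
      rcases hpre with h | h
      · omega
      · exact h
    unfold expand_stone_once expand_stone_once_alt
    rw [if_neg h0, if_neg h0]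
    have hchars : (PySem.Int.toStr stone).toList = '-' :: Nat.toDigits 10 stone.natAbs := by
      rw [PySem.Int.toList_toStr]
      simp [PySem.Int.toChars, hneg]
    have hlen : PySem.Str.len (PySem.Int.toStr stone) =
        (((Nat.toDigits 10 stone.natAbs).length + 1 : Nat) : Int) := by
      rw [PySem.Str.len_eq, hchars]
      push_cast
      simp
    have hlength : (Nat.toDigits 10 stone.natAbs).length = Nat.log 10 stone.natAbs + 1 :=
      pv_len_toDigits _ (by omega)
    have hA : ¬ (PySem.Int.mod (PySem.Str.len (PySem.Int.toStr stone)) 2 = 0) := by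
      rw [hlen, pv_mod_two]
      intro hcon
      have : ((Nat.toDigits 10 stone.natAbs).length + 1) % 2 = 0 := by exact_mod_cast hcon
      omega
    rw [if_neg hA]
    have hB : pvDigitCount stone 1 = 1 := by
      unfold pvDigitCount
      rw [dif_neg (by omega)]
    rw [hB]
    norm_num
  -- nonnegative, nonzero stones
  · have hm : stone = ((stone.toNat : Nat) : Int) := by omega
    set m : Nat := stone.toNat with hmdef
    have hmp : 0 < m := by omega
    set L : List Char := Nat.toDigits 10 m with hL
    have hchars : (PySem.Int.toStr stone).toList = L := by
      rw [PySem.Int.toList_toStr]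
      simp [PySem.Int.toChars, not_lt.mpr (by omega : (0:Int) ≤ stone)]
      rw [hL]
    have hlen : PySem.Str.len (PySem.Int.toStr stone) = ((L.length : Nat) : Int) := by
      rw [PySem.Str.len_eq, hchars]
    have hLpos : 0 < L.length := Nat.length_toDigits_pos
    have hcount : pvDigitCount stone 1 = L.length := by
      rw [hm, pv_digitCount_eq m hmp 1, hL, pv_len_toDigits m hmp]
      omega
    have hdigits : ∀ c ∈ L, c.isDigit = true := pv_toDigits_digits m
    have hvalL : pvVal 0 L = m := pv_val_toDigits m
    unfold expand_stone_once expand_stone_once_alt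
    rw [if_neg h0, if_neg h0]
    simp only [hlen, hcount]
    by_cases hpar : L.length % 2 = 0
    · -- even number of digits: A splits the string, B uses divmod
      have hA : PySem.Int.mod ((L.length : Nat) : Int) 2 = 0 := by
        rw [pv_mod_two, hpar]
        rfl
      rw [if_pos hA, if_pos hpar]
      have hhalf : PySem.Int.floordiv ((L.length : Nat) : Int) 2 = ((L.length / 2 : Nat) : Int) := by
        exact_mod_cast PySem.Int.floordiv_natCast L.length 2
      rw [hhalf]
      set hw : Nat := L.length / 2 with hhw
      have hw1 : 1 ≤ hw := by omega
      have hwlt : hw < L.length := by omega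
      -- the two string halves
      have hsl1 : (PySem.Str.slice (PySem.Int.toStr stone) (some 0) (some ((hw : Nat) : Int))).toList
          = L.take hw := by
        rw [PySem.Str.toList_slice, PySem.Chars.slice_eq_listSlice, hchars]
        rw [PySem.List.slice_zero_start, PySem.List.slice_to_natCast]
      have hsl2 : (PySem.Str.slice (PySem.Int.toStr stone) (some ((hw : Nat) : Int)) none).toList
          = L.drop hw := by
        rw [PySem.Str.toList_slice, PySem.Chars.slice_eq_listSlice, hchars]
        rw [PySem.List.slice_from_natCast]
      -- parse the two halves
      obtain ⟨c1, t1, hct1⟩ : ∃ c t, L.take hw = c :: t := by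
        cases hcase : L.take hw with
        | nil =>
          have : (L.take hw).length = hw := by simp; omega
          rw [hcase] at this
          simp at this
          omega
        | cons a b => exact ⟨a, b, rfl⟩
      obtain ⟨c2, t2, hct2⟩ : ∃ c t, L.drop hw = c :: t := by
        cases hcase : L.drop hw with
        | nil =>
          have : (L.drop hw).length = L.length - hw := by simp
          rw [hcase] at this
          simp at this
          omega
        | cons a b => exact ⟨a, b, rfl⟩
      have hd1 : ∀ x ∈ L.take hw, x.isDigit = true := fun x hx => hdigits x (List.mem_of_mem_take hx)
      have hd2 : ∀ x ∈ L.drop hw, x.isDigit = true := fun x hx => hdigits x (List.mem_of_mem_drop hx)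
      have hp1 : PySem.Int.ofChars? (L.take hw) = some ((pvVal 0 (L.take hw) : Nat) : Int) := by
        rw [hct1]
        exact pv_parse c1 t1 (hd1 c1 (by rw [hct1]; simp)) (fun x hx => hd1 x (by rw [hct1]; simp [hx]))
      have hp2 : PySem.Int.ofChars? (L.drop hw) = some ((pvVal 0 (L.drop hw) : Nat) : Int) := by
        rw [hct2]
        exact pv_parse c2 t2 (hd2 c2 (by rw [hct2]; simp)) (fun x hx => hd2 x (by rw [hct2]; simp [hx]))
      -- numeric identification of the halves
      have hlen2 : (L.drop hw).length = hw := by simp; omega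
      have hsplit : m = pvVal 0 (L.take hw) * 10 ^ hw + pvVal 0 (L.drop hw) := by
        have happ : pvVal 0 L = pvVal (pvVal 0 (L.take hw)) (L.drop hw) := by
          simp only [pvVal]
          rw [← List.foldl_append, List.take_append_drop]
        rw [← hvalL, happ, pv_foldl_acc, hlen2]
      have hbound : pvVal 0 (L.drop hw) < 10 ^ hw := by
        have := pv_val_lt (L.drop hw) hd2
        rwa [hlen2] at this
      obtain ⟨hdiv, hmod⟩ := pv_div_mod_char (pvVal 0 (L.take hw)) (pvVal 0 (L.drop hw))
        (10 ^ hw) m (Nat.pow_pos (by omega)) hsplit hbound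
      -- B's divmod in terms of the same values
      have hpow : ((10 : Int) ^ hw) = (((10 ^ hw : Nat)) : Int) := by push_cast; ring
      have hdivB : PySem.Int.floordiv stone ((10 : Int) ^ hw) = ((pvVal 0 (L.take hw) : Nat) : Int) := by
        rw [hm, hpow, ← hdiv]
        exact_mod_cast PySem.Int.floordiv_natCast m (10 ^ hw)
      have hmodB : PySem.Int.mod stone ((10 : Int) ^ hw) = ((pvVal 0 (L.drop hw) : Nat) : Int) := by
        rw [hm, hpow, ← hmod]
        exact_mod_cast PySem.Int.mod_natCast m (10 ^ hw)
      rw [PySem.Int.ofStr?.eq_1, PySem.Int.ofStr?.eq_1, hsl1, hsl2, hp1, hp2, hdivB, hmodB]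
    · -- odd number of digits: both multiply by 2024
      have hA : ¬ (PySem.Int.mod ((L.length : Nat) : Int) 2 = 0) := by
        rw [pv_mod_two]
        intro hcon
        have : L.length % 2 = 0 := by exact_mod_cast hcon
        omega
      rw [if_neg hA, if_neg hpar]

-- ===== VERDICT (by name: the statement is the Claim_ definition above) =====
theorem expand_stone_once_spec : Claim_equal_expand_stone_once := by
  intro stone hdom hpre
  unfold Spec_expand_stone_once
  by_cases h0 : stone = 0
  · subst h0
    rfl
  · exact pv_main stone hpre h0
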